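-- pv_equiv track=rewrite | github.com/yangzongwu/leetcode | 20200215Python-China/0788. Rotated Digits.py | isGoodDigit
-- ===== SOURCE A (Python) =====
-- def isGoodDigit(s):
--     for ss in "347":
--         if ss in s:
--             return False
--     for ss in '2569':
--         if ss in s:
--             return True
--     return False
-- ===== SOURCE B (Python) =====
-- def isGoodDigit(s):
--     found = False
--     for c in s:
--         if c in '347':
--             return False
--         if c in '2569':
--             found = True
--     return found
-- ===== Notes on version B (the rewrite author's own statement) =====
-- stated objective: alternative
-- what changed: B replaces A's seven repeated substring scans of s (one per target digit) with a single pass over the characters of s that classifies each character and keeps a found flag.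
import Mathlib
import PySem

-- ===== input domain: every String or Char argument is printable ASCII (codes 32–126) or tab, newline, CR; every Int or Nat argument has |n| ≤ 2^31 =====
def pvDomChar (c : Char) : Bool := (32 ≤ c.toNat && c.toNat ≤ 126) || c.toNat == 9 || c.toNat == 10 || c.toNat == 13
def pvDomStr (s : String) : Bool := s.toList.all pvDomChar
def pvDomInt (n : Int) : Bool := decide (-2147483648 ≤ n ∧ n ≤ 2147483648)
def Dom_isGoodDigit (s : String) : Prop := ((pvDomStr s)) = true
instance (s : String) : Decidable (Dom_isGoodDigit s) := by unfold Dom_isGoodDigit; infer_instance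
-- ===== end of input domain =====

-- B makes one classifying pass over the characters of s with a found flag, instead of A's seven substring scans of s.


-- ===== PORT A =====
-- Python's 'ss in s' with ss a single character is exactly character membership in s
-- (ported by hand as List.contains on s.toList; exact for one-character needles).
-- for ss in "347": if ss in s: return False   (early return carried as Option)
def isGoodDigitLoop1 : List Char → String → Option Bool
  | [], _ => none
  | c :: rest, s => if s.toList.contains c then some false else isGoodDigitLoop1 rest s

-- for ss in '2569': if ss in s: return True
def isGoodDigitLoop2 : List Char → String → Option Bool
  | [], _ => none
  | c :: rest, s => if s.toList.contains c then some true else isGoodDigitLoop2 rest s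

def isGoodDigit (s : String) : Bool :=
  match isGoodDigitLoop1 "347".toList s with
  | some b => b
  | none =>
    match isGoodDigitLoop2 "2569".toList s with
    | some b => b
    | none => false

-- ===== PORT B =====
-- single pass over s: return False on a disqualifying char, set the flag on a rotating char
def isGoodDigitAltLoop : List Char → Bool → Bool
  | [], found => found
  | c :: rest, found =>
    if "347".toList.contains c then false
    else isGoodDigitAltLoop rest (found || "2569".toList.contains c)

def isGoodDigit_alt (s : String) : Bool := isGoodDigitAltLoop s.toList false

-- ===== PRECONDITION & SPEC =====
def Spec_isGoodDigit (s : String) (out : Bool) : Prop := out = isGoodDigit_alt s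
instance (s : String) (out : Bool) : Decidable (Spec_isGoodDigit s out) := by unfold Spec_isGoodDigit; infer_instance

-- ===== CLAIM (what is proved, stated in full; the proofs are below) =====
def Claim_equal_isGoodDigit : Prop := ∀ (s : String), Dom_isGoodDigit s → Spec_isGoodDigit s (isGoodDigit s)

-- ===== LEMMAS AND PROOFS =====

theorem any_or_split (l : List Char) (p q : Char → Bool) :
    l.any (fun c => p c || q c) = (l.any p || l.any q) := by
  induction l with
  | nil => rfl
  | cons c rest ih =>
    simp only [List.any_cons, ih]
    cases p c <;> cases q c <;> cases rest.any p <;> cases rest.any q <;> rfl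

theorem any_eq_digit (l : List Char) (d : Char) :
    l.any (fun c => c == d) = decide (d ∈ l) := by
  induction l with
  | nil => rfl
  | cons c rest ih =>
    simp only [List.any_cons, ih, List.mem_cons]
    by_cases h : d = c
    · subst h; simp
    · have hcd : (c == d) = false := by
        simp only [beq_eq_false_iff_ne, ne_eq]
        exact fun hh => h hh.symm
      simp [h, hcd]

-- B's loop: false if any disqualifier ahead, else flag OR any rotating digit ahead
theorem altLoop_spec (l : List Char) (found : Bool) :
    isGoodDigitAltLoop l found =
      (!(l.any fun c => decide (c ∈ ['3','4','7'])) &&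
        (found || l.any fun c => decide (c ∈ ['2','5','6','9']))) := by
  induction l generalizing found with
  | nil => simp [isGoodDigitAltLoop]
  | cons c rest ih =>
    have e1 : "347".toList = ['3','4','7'] := rfl
    have e2 : "2569".toList = ['2','5','6','9'] := rfl
    simp only [isGoodDigitAltLoop, List.contains_eq_mem, e1, e2, List.any_cons, ih]
    by_cases hb : c ∈ ['3','4','7'] <;> by_cases hg : c ∈ ['2','5','6','9'] <;>
      simp only [hb, hg, decide_true, decide_false] <;>
        cases found <;> cases (rest.any fun c => decide (c ∈ ['3','4','7'])) <;> simp [Bool.or_assoc]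

theorem isGoodDigit_spec : Claim_equal_isGoodDigit := by
  intro s _
  show isGoodDigit s = isGoodDigit_alt s
  unfold isGoodDigit isGoodDigit_alt
  rw [altLoop_spec]
  have h347 : "347".toList = ['3','4','7'] := rfl
  have h2569 : "2569".toList = ['2','5','6','9'] := rfl
  rw [h347, h2569]
  simp only [isGoodDigitLoop1, isGoodDigitLoop2, List.contains_eq_mem]
  have hb : (s.toList.any fun c => decide (c ∈ ['3','4','7']))
      = (decide ('3' ∈ s.toList) || decide ('4' ∈ s.toList) || decide ('7' ∈ s.toList)) := by
    have : (fun c => decide (c ∈ (['3','4','7'] : List Char)))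
        = fun c => (c == '3') || ((c == '4') || (c == '7')) := by
      funext c
      by_cases h3 : c = '3' <;> by_cases h4 : c = '4' <;> by_cases h7 : c = '7' <;> simp [h3, h4, h7]
    rw [this, any_or_split, any_or_split, any_eq_digit, any_eq_digit, any_eq_digit, Bool.or_assoc]
  have hg : (s.toList.any fun c => decide (c ∈ ['2','5','6','9']))
      = (decide ('2' ∈ s.toList) || decide ('5' ∈ s.toList) || decide ('6' ∈ s.toList) || decide ('9' ∈ s.toList)) := by
    have : (fun c => decide (c ∈ (['2','5','6','9'] : List Char)))
        = fun c => (c == '2') || ((c == '5') || ((c == '6') || (c == '9'))) := by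
      funext c
      by_cases h2 : c = '2' <;> by_cases h5 : c = '5' <;> by_cases h6 : c = '6' <;>
        by_cases h9 : c = '9' <;> simp [h2, h5, h6, h9]
    rw [this, any_or_split, any_or_split, any_or_split, any_eq_digit, any_eq_digit, any_eq_digit,
      any_eq_digit, Bool.or_assoc, Bool.or_assoc]
  rw [hb, hg]
  generalize decide ('3' ∈ s.toList) = b3
  generalize decide ('4' ∈ s.toList) = b4
  generalize decide ('7' ∈ s.toList) = b7
  generalize decide ('2' ∈ s.toList) = b2
  generalize decide ('5' ∈ s.toList) = b5
  generalize decide ('6' ∈ s.toList) = b6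
  generalize decide ('9' ∈ s.toList) = b9
  revert b3 b4 b7 b2 b5 b6 b9
  decide
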